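-- pv_equiv track=rewrite | github.com/mangangreg/advent_of_code | 2023/day14/day14.py | resort_column
-- ===== SOURCE A (Python) =====
-- class Cell:
--     CIRCLE = 'O'
--     EMPTY = '.'
--     ROCK = '#'
--
-- def resort_column(col,reverse=True):
--     og_col = col
--     if type(og_col) is list:
--         og_col = "".join(og_col)
--     segments = og_col.split(Cell.ROCK)
--     segments = ["".join(sorted(segment, reverse=reverse)) for segment in segments]
--     new_col = list(Cell.ROCK.join(segments))
--     return new_col
-- ===== SOURCE B (Python) =====
-- # B: counting sort per '#'-segment (tally chars in a dict, emit by code) instead of comparison sort.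
-- def _counting_sorted(segment, reverse):
--     counts = {}
--     for ch in segment:
--         counts[ch] = counts.get(ch, 0) + 1
--     codes = range(255, -1, -1) if reverse else range(256)
--     pieces = []
--     for i in codes:
--         pieces.append(chr(i) * counts.get(chr(i), 0))
--     return "".join(pieces)
--
-- def resort_column(col, reverse=True):
--     og_col = col
--     if type(og_col) is list:
--         og_col = "".join(og_col)
--     parts = [_counting_sorted(seg, reverse) for seg in og_col.split('#')]
--     return list('#'.join(parts))
-- ===== Notes on version B (the rewrite author's own statement) =====
-- stated objective: alternative
-- what changed: Replaces the per-segment comparison sort (sorted(segment, reverse=...)) with a counting sort: each rock-delimited segment is tallied into a dict and re-emitted by character code in ascending or descending order.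
import Mathlib
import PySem

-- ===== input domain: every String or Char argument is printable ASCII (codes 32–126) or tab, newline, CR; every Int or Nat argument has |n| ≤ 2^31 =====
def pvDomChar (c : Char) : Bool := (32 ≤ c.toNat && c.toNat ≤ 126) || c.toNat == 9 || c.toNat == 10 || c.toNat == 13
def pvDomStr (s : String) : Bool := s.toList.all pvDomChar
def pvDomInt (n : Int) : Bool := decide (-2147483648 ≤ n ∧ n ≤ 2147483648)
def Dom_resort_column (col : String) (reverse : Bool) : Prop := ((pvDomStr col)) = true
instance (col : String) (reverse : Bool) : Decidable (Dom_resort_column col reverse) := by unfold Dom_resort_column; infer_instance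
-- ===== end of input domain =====

-- B replaces the per-segment comparison sort by a counting sort (tally into a dict, emit by character code):
-- an alternative algorithm of similar cost, no speed claim.

-- ===== PORT A =====
-- 'col' is a str under the type convention, so the 'type(og_col) is list' branch never fires.
def resort_column (col : String) (reverse : Bool) : List String :=
  let ogCol : List Char := col.toList
  let segments := PySem.Chars.splitOn ogCol ['#']
  let segments2 := segments.map (fun segment => PySem.List.sorted segment (fun c => c) reverse)
  let newCol := PySem.Chars.join ['#'] segments2
  newCol.map (fun c => String.ofList [c])

-- ===== PORT B =====
-- the tally loop: counts[ch] = counts.get(ch, 0) + 1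
def pvCounts (segment : List Char) : PySem.Dict Char Int :=
  segment.foldl (fun d ch => d.insert ch (d.getD ch 0 + 1)) PySem.Dict.empty

-- the codes loop: pieces.append(chr(i) * counts.get(chr(i), 0)); "".join(pieces) concatenates the pieces in order
def pvCountingSorted (segment : List Char) (reverse : Bool) : List Char :=
  let counts := pvCounts segment
  let codes := if reverse then PySem.List.pyRange 255 (-1) (-1) else PySem.List.pyRange 0 256 1
  codes.foldl (fun acc i => acc ++ List.replicate (counts.getD (Char.ofNat i.toNat) 0).toNat (Char.ofNat i.toNat)) []

def resort_column_alt (col : String) (reverse : Bool) : List String :=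
  let ogCol : List Char := col.toList
  let parts := (PySem.Chars.splitOn ogCol ['#']).map (fun seg => pvCountingSorted seg reverse)
  (PySem.Chars.join ['#'] parts).map (fun c => String.ofList [c])

-- ===== PRECONDITION & SPEC =====
def Spec_resort_column (col : String) (reverse : Bool) (out : List String) : Prop := out = resort_column_alt col reverse
instance (col : String) (reverse : Bool) (out : List String) : Decidable (Spec_resort_column col reverse out) := by unfold Spec_resort_column; infer_instance

-- ===== CLAIM (what is proved, stated in full; the proofs are below) =====
def Claim_equal_resort_column : Prop := ∀ (col : String) (reverse : Bool), Dom_resort_column col reverse → Spec_resort_column col reverse (resort_column col reverse)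

-- ===== LEMMAS AND PROOFS =====

-- Char-code bridges
theorem pvChar_le_iff (a b : Char) : a ≤ b ↔ a.toNat ≤ b.toNat :=
  ⟨fun h => Fin.mk_le_mk.mp h, fun h => Fin.mk_le_mk.mpr h⟩

theorem pvChar_toNat_ofNat {i : Nat} (h : i < 256) : (Char.ofNat i).toNat = i := by
  unfold Char.ofNat
  split
  · rfl
  · rename_i hn; exact absurd (Or.inl (by omega)) hn

theorem pvChar_toNat_injective : Function.Injective Char.toNat := by
  intro a b h
  have h' : a.val.toNat = b.val.toNat := h
  exact Char.ext (UInt32.toNat_inj.mp h')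

theorem pvChar_ofNat_toNat (c : Char) (h : c.toNat < 256) : Char.ofNat c.toNat = c :=
  pvChar_toNat_injective (pvChar_toNat_ofNat h)

-- counts.get(ch, 0) after the tally loop is the multiplicity of ch in the segment
theorem pvCounts_getD (seg : List Char) (c : Char) :
    (pvCounts seg).getD c 0 = (seg.count c : Int) := by
  have h : pvCounts seg = PySem.Dict.counter seg := rfl
  rw [h, PySem.Dict.getD_counter]

-- the ascending block list of the counting sort
def pvBlocks (seg : List Char) : List (List Char) :=
  (List.range 256).map (fun i => List.replicate (seg.count (Char.ofNat i)) (Char.ofNat i))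

theorem pvSum_single (f : Nat → Nat) (n k : Nat) (hk : k < n)
    (h0 : ∀ i < n, i ≠ k → f i = 0) : ((List.range n).map f).sum = f k := by
  induction n with
  | zero => omega
  | succ m ih =>
    rw [List.range_succ, List.map_append, List.sum_append]
    by_cases hkm : k = m
    · subst hkm
      have hz : ((List.range k).map f).sum = 0 := by
        apply List.sum_eq_zero
        intro x hx
        simp only [List.mem_map, List.mem_range] at hx
        obtain ⟨i, hi, rfl⟩ := hx
        exact h0 i (by omega) (by omega)
      simp [hz]
    · rw [ih (by omega) (fun i hi hik => h0 i (by omega) hik)]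
      have hm : f m = 0 := h0 m (by omega) (fun h => hkm h.symm)
      simp [hm]

theorem pvBlocks_perm (seg : List Char) (h : ∀ c ∈ seg, c.toNat < 256) :
    ((pvBlocks seg).flatten).Perm seg := by
  rw [List.perm_iff_count]
  intro c
  unfold pvBlocks
  rw [← List.flatMap_def, List.count_flatMap]
  simp only [Function.comp_def, List.count_replicate]
  by_cases hc : c.toNat < 256
  · rw [pvSum_single _ 256 c.toNat hc ?h0]
    case h0 =>
      intro i hi hik
      have hne : ¬ (Char.ofNat i = c) := by
        intro he
        exact hik (by rw [← he, pvChar_toNat_ofNat hi])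
      simp [hne]
    simp [pvChar_ofNat_toNat c hc]
  · have hz : ∀ x ∈ (List.range 256).map
        (fun i => if (Char.ofNat i == c) = true then seg.count (Char.ofNat i) else 0), x = 0 := by
      intro x hx
      simp only [List.mem_map, List.mem_range] at hx
      obtain ⟨i, hi, rfl⟩ := hx
      have hne : ¬ (Char.ofNat i = c) := by
        intro he
        rw [← he, pvChar_toNat_ofNat hi] at hc
        omega
      simp [hne]
    rw [List.sum_eq_zero hz]
    symm
    rw [List.count_eq_zero]
    intro hmem
    exact hc (h c hmem)

theorem pvBlocks_pairwise (seg : List Char) :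
    List.Pairwise (fun a b => a ≤ b) (pvBlocks seg).flatten := by
  rw [List.pairwise_flatten]
  constructor
  · intro l hl
    unfold pvBlocks at hl
    simp only [List.mem_map, List.mem_range] at hl
    obtain ⟨i, _, rfl⟩ := hl
    exact List.pairwise_replicate.mpr (Or.inr le_rfl)
  · unfold pvBlocks
    rw [List.pairwise_map]
    have base := List.Pairwise.and_mem.mp (List.pairwise_lt_range (n := 256))
    refine base.imp ?_
    rintro i j ⟨hi, hj, hij⟩
    simp only [List.mem_range] at hi hj
    intro x hx y hy
    rw [List.eq_of_mem_replicate hx, List.eq_of_mem_replicate hy, pvChar_le_iff,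
      pvChar_toNat_ofNat hi, pvChar_toNat_ofNat hj]
    omega

theorem pvReverse_flatMap {α β : Type} (l : List α) (f : α → List β) :
    l.reverse.flatMap f = (l.flatMap (fun x => (f x).reverse)).reverse := by
  induction l with
  | nil => rfl
  | cons a t ih => simp [List.flatMap_append, ih]

theorem pvCountingSorted_eq (seg : List Char) (h : ∀ c ∈ seg, c.toNat < 256) (rev : Bool) :
    pvCountingSorted seg rev = PySem.List.sorted seg (fun c => c) rev := by
  have hrange : PySem.List.pyRange 0 256 1 = (List.range 256).map (fun k : Nat => (k : Int)) := by
    rw [show ((256 : Int)) = ((256 : Nat) : Int) by norm_num, PySem.List.pyRange_zero_natCast]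
  have hbl : (List.range 256).flatMap
      (fun a : Nat => List.replicate (((pvCounts seg).getD (Char.ofNat ((a : Int)).toNat) 0).toNat) (Char.ofNat ((a : Int)).toNat))
      = (pvBlocks seg).flatten := by
    unfold pvBlocks
    rw [← List.flatMap_def]
    congr 1
    funext i
    simp [pvCounts_getD]
  cases rev with
  | false =>
    unfold pvCountingSorted
    rw [if_neg Bool.false_ne_true, PySem.List.foldl_append_eq_flatMap, List.nil_append, hrange]
    simp only [List.flatMap_map]
    rw [hbl]
    exact (PySem.List.eq_of_perm_of_pairwise_le_of_injective (key := fun c : Char => c)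
      Function.injective_id
      ((PySem.List.sorted_perm seg _ false).trans (pvBlocks_perm seg h).symm)
      (PySem.List.sorted_pairwise seg _) (pvBlocks_pairwise seg)).symm
  | true =>
    unfold pvCountingSorted
    rw [if_pos rfl, PySem.List.pyRange_neg_one_eq_reverse 255 (-1),
      show ((-1 : Int) + 1) = 0 by norm_num, show ((255 : Int) + 1) = 256 by norm_num,
      PySem.List.foldl_append_eq_flatMap, List.nil_append, hrange, pvReverse_flatMap]
    simp only [List.reverse_replicate, List.flatMap_map]
    rw [hbl]
    refine (PySem.List.eq_of_perm_of_pairwise_le_of_injective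
      (key := fun c : Char => (255 : Int) - c.toNat) ?_ ?_ ?_ ?_).symm
    · intro a b hab
      apply pvChar_toNat_injective
      dsimp at hab
      omega
    · exact (PySem.List.sorted_perm seg _ true).trans
        ((pvBlocks_perm seg h).symm.trans ((pvBlocks seg).flatten.reverse_perm).symm)
    · refine (PySem.List.sorted_pairwise_rev seg (fun c => c)).imp ?_
      intro a b hba
      have h' := (pvChar_le_iff b a).mp hba
      dsimp
      omega
    · rw [List.pairwise_reverse]
      refine (pvBlocks_pairwise seg).imp ?_
      intro a b hab
      have h' := (pvChar_le_iff a b).mp hab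
      dsimp
      omega

-- every character of a segment produced by the split is a character of the original string
theorem pvGo_mem (sep : List Char) :
    ∀ (fuel : Nat) (l cur : List Char) (acc : List (List Char)) (seg : List Char) (c : Char),
      seg ∈ PySem.Chars.splitOn.go sep fuel l cur acc → c ∈ seg →
      c ∈ l ∨ c ∈ cur ∨ ∃ t ∈ acc, c ∈ t := by
  intro fuel
  induction fuel with
  | zero =>
    intro l cur acc seg c hseg hc
    rw [PySem.Chars.splitOn.go.eq_def] at hseg
    simp only [List.mem_reverse, List.mem_cons] at hseg
    rcases hseg with rfl | hseg
    · rcases List.mem_append.mp hc with h | h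
      · exact Or.inr (Or.inl (List.mem_reverse.mp h))
      · exact Or.inl h
    · exact Or.inr (Or.inr ⟨seg, hseg, hc⟩)
  | succ m ih =>
    intro l cur acc seg c hseg hc
    cases l with
    | nil =>
      rw [PySem.Chars.splitOn.go.eq_def] at hseg
      simp only [List.mem_reverse, List.mem_cons] at hseg
      rcases hseg with rfl | hseg
      · exact Or.inr (Or.inl (List.mem_reverse.mp hc))
      · exact Or.inr (Or.inr ⟨seg, hseg, hc⟩)
    | cons a rest =>
      rw [PySem.Chars.splitOn.go.eq_def] at hseg
      simp only at hseg
      by_cases hpre : sep.isPrefixOf (a :: rest) = true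
      · rw [if_pos hpre] at hseg
        rcases ih _ _ _ seg c hseg hc with h | h | ⟨t, ht, hct⟩
        · exact Or.inl (List.mem_of_mem_drop h)
        · simp at h
        · rcases List.mem_cons.mp ht with rfl | ht'
          · exact Or.inr (Or.inl (List.mem_reverse.mp hct))
          · exact Or.inr (Or.inr ⟨t, ht', hct⟩)
      · rw [if_neg hpre] at hseg
        rcases ih _ _ _ seg c hseg hc with h | h | ⟨t, ht, hct⟩
        · exact Or.inl (List.mem_cons_of_mem _ h)
        · rcases List.mem_cons.mp h with rfl | h'
          · exact Or.inl List.mem_cons_self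
          · exact Or.inr (Or.inl h')
        · exact Or.inr (Or.inr ⟨t, ht, hct⟩)

theorem pvMem_splitOn {s sep seg : List Char} {c : Char}
    (hseg : seg ∈ PySem.Chars.splitOn s sep) (hc : c ∈ seg) : c ∈ s := by
  unfold PySem.Chars.splitOn at hseg
  rcases pvGo_mem sep (s.length + 1) s [] [] seg c hseg hc with h | h | ⟨t, ht, _⟩
  · exact h
  · simp at h
  · simp at ht

-- ===== VERDICT (by name: the statement is the Claim_ definition above) =====
theorem resort_column_spec : Claim_equal_resort_column := by
  intro col reverse hdom
  unfold Spec_resort_column resort_column resort_column_alt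
  have hmap : (PySem.Chars.splitOn col.toList ['#']).map
        (fun segment => PySem.List.sorted segment (fun c => c) reverse)
      = (PySem.Chars.splitOn col.toList ['#']).map (fun seg => pvCountingSorted seg reverse) := by
    apply List.map_congr_left
    intro seg hseg
    refine (pvCountingSorted_eq seg ?_ reverse).symm
    intro c hc
    have hcol : c ∈ col.toList := pvMem_splitOn hseg hc
    have hdc : pvDomChar c = true := by
      unfold Dom_resort_column pvDomStr at hdom
      exact List.all_eq_true.mp hdom c hcol
    unfold pvDomChar at hdc
    simp at hdc
    omega
  simp only [hmap]
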